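-- pv_equiv track=rewrite | github.com/rmcrowley2000/PAPERR | prep38.py | strip_mathjax
-- ===== SOURCE A (Python) =====
-- def strip_mathjax(html):
--     html_out = []
--     writing = True
--     for line in html:
--         if 'dynamically load mathjax for compatibility with self-contained' in line:
--             writing = False
--         if writing:
--             html_out.append(line)
--         if not writing and '</script>' in line:
--             writing = True
--     return html_out
-- ===== SOURCE B (Python) =====
-- MARKER = 'dynamically load mathjax for compatibility with self-contained'
--
-- def strip_mathjax(html):
--     out = []
--     i = 0
--     n = len(html)
--     while i < n:
--         line = html[i]
--         if MARKER in line: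
--             if '</script>' not in line:
--                 i += 1
--                 while i < n and '</script>' not in html[i]:
--                     i += 1
--             i += 1  # skip the closing </script> line (or the marker line itself)
--             continue
--         out.append(line)
--         i += 1
--     return out
-- ===== Notes on version B (the rewrite author's own statement) =====
-- stated objective: alternative
-- what changed: Replaces A's boolean 'writing' state threaded through a single for-loop with an explicit-index while loop that, on a marker line, runs a dedicated inner skip loop advancing past the block and its closing </script> line.
import Mathlib
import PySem

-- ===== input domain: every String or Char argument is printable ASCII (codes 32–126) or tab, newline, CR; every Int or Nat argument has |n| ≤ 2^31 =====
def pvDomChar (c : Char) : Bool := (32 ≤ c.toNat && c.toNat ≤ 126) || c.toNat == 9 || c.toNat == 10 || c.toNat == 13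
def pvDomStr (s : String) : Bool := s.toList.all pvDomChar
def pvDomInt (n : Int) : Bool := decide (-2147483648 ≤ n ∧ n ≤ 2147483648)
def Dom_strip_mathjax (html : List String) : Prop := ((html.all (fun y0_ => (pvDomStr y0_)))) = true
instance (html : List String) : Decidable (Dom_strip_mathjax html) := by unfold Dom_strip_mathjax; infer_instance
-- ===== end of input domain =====

-- B replaces A's boolean 'writing' flag threaded through one for-loop with an
-- explicit outer loop plus a dedicated inner skip loop (alternative decomposition).


def pvMarker : String := "dynamically load mathjax for compatibility with self-contained"

-- ===== PORT A =====
-- one iteration of A's for-loop: state = (html_out, writing)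
def stripStepA (st : List String × Bool) (line : String) : List String × Bool :=
  let writing := if PySem.Str.isIn pvMarker line then false else st.2
  let out := if writing then st.1 ++ [line] else st.1
  let writing := if !writing && PySem.Str.isIn "</script>" line then true else writing
  (out, writing)

def strip_mathjax (html : List String) : List String :=
  (html.foldl stripStepA ([], true)).1

-- ===== PORT B =====
mutual
-- outer loop of Source B: copy lines; on a marker line dispatch to the skip loop
def stripOuter : List String → List String
  | [] => []
  | line :: rest =>
    if PySem.Str.isIn pvMarker line then
      if PySem.Str.isIn "</script>" line then stripOuter rest else stripSkip rest
    else
      line :: stripOuter rest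
-- inner while loop of Source B: drop lines up to and including the closing </script> line
def stripSkip : List String → List String
  | [] => []
  | line :: rest =>
    if PySem.Str.isIn "</script>" line then stripOuter rest else stripSkip rest
end

def strip_mathjax_alt (html : List String) : List String := stripOuter html

-- ===== PRECONDITION & SPEC =====
def Spec_strip_mathjax (html : List String) (out : List String) : Prop := out = strip_mathjax_alt html
instance (html : List String) (out : List String) : Decidable (Spec_strip_mathjax html out) := by unfold Spec_strip_mathjax; infer_instance

-- ===== CLAIM (what is proved, stated in full; the proofs are below) =====
def Claim_equal_strip_mathjax : Prop := ∀ (html : List String), Dom_strip_mathjax html → Spec_strip_mathjax html (strip_mathjax html)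

-- ===== LEMMAS AND PROOFS =====
theorem stripFold_eq (l : List String) : ∀ out : List String,
    (l.foldl stripStepA (out, true)).1 = out ++ stripOuter l ∧
    (l.foldl stripStepA (out, false)).1 = out ++ stripSkip l := by
  induction l with
  | nil => intro out; simp [stripOuter, stripSkip]
  | cons line rest ih =>
    intro out
    by_cases hm : PySem.Chars.isIn pvMarker.toList line.toList = true <;>
      by_cases hs : PySem.Chars.isIn ['<', '/', 's', 'c', 'r', 'i', 'p', 't', '>'] line.toList = true <;>
      simp [List.foldl, stripStepA, stripOuter, stripSkip, hm, hs, ih,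
        List.append_assoc]

-- ===== VERDICT (by name: the statement is the Claim_ definition above) =====
theorem strip_mathjax_spec : Claim_equal_strip_mathjax := by
  intro html _
  unfold Spec_strip_mathjax strip_mathjax strip_mathjax_alt
  simpa using (stripFold_eq html []).1
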